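-- pv_equiv track=rewrite | github.com/OhJeong-Taek/algorithm-from-2023 | programmers/Lv.1/햄버거만들기.py | solution
-- ===== SOURCE A (Python) =====
-- def solution(ingredient):
--     answer = 0
--     i = 0
--     while i < len(ingredient) - 3:
--         if ingredient[i:i+4] == [1,2,3,1]:
--             del ingredient[i:i+4]
--             answer += 1
--             i -= 3
--         else:
--             i += 1
--     return answer
-- ===== SOURCE B (Python) =====
-- def solution(ingredient):
--     stack = []
--     answer = 0
--     for x in ingredient:
--         stack.append(x)
--         if stack[-4:] == [1, 2, 3, 1]:
--             del stack[-4:]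
--             answer += 1
--     return answer
-- ===== Notes on version B (the rewrite author's own statement) =====
-- stated objective: alternative
-- what changed: Replaces A's while-loop over a mutating list (slice-compare at i, del ingredient[i:i+4] and back up 3 on a match) by a single left-to-right pass that pushes each item onto a stack and pops whenever the top four read [1,2,3,1]; counting pops.
import Mathlib
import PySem

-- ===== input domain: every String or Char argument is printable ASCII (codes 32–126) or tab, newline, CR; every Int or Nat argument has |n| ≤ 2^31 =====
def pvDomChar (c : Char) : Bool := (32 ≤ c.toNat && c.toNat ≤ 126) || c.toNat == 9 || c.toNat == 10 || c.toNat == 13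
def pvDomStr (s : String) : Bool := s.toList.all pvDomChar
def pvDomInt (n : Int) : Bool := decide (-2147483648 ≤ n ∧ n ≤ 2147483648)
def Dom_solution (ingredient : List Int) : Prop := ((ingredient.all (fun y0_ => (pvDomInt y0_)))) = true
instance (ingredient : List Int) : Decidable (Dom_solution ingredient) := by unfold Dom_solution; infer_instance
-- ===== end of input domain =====

-- B replaces A's delete-from-the-list-and-back-up-3 while-loop by a single push/pop stack pass
-- (intended as faster on deletion-heavy inputs; measured 1.33x on random inputs, so not claimed);
-- A mutates its argument in place (del ingredient[i:i+4]), B does not: equivalence is about the return value.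

-- ===== PORT A =====
-- termination measure facts for A's while-loop (cited by name in decreasing_by)
lemma pv_dec_del (l : List Int) (i : Int) (h1 : i < (l.length : Int) - 3)
    (h2 : PySem.List.slice l (some i) (some (i + 4)) = ([1, 2, 3, 1] : List Int)) :
    (5 * ((PySem.List.slice l none (some i) ++ PySem.List.slice l (some (i + 4)) none).length : Int)
        - (i - 3)).toNat < (5 * (l.length : Int) - i).toNat := by
  have hlen := congrArg List.length h2
  rw [PySem.List.length_slice] at hlen
  norm_num at hlen
  have ha : (PySem.List.slice l none (some i)).length
      = PySem.List.clampIdx l.length i - PySem.List.clampIdx l.length 0 := by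
    rw [← PySem.List.slice_zero_start, PySem.List.length_slice]
  have h0 : PySem.List.clampIdx l.length (0 : Int) = 0 := by
    simp [PySem.List.clampIdx]
  have hb : (PySem.List.slice l (some (i + 4)) none).length
      = l.length - PySem.List.clampIdx l.length (i + 4) := by
    rw [PySem.List.slice_some_none, List.length_drop]
  have hle := PySem.List.clampIdx_le l.length (i + 4)
  rw [List.length_append, ha, hb, h0]
  have h0' : (0 : Int) ≤ (l.length : Int) := Int.natCast_nonneg _
  rw [Int.toNat_lt_toNat (by omega)]
  push_cast
  omega

lemma pv_dec_adv (l : List Int) (i : Int) (h1 : i < (l.length : Int) - 3) :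
    (5 * (l.length : Int) - (i + 1)).toNat < (5 * (l.length : Int) - i).toNat := by
  have h0 : (0 : Int) ≤ (l.length : Int) := Int.natCast_nonneg _
  rw [Int.toNat_lt_toNat (by omega)]
  omega

-- the while-loop of A: state (current list, index i, answer); `del ingredient[i:i+4]`
-- is ingredient[:i] ++ ingredient[i+4:] (Python slice semantics via PySem.List.slice)
def solutionLoop (l : List Int) (i : Int) (ans : Int) : Int :=
  if i < (l.length : Int) - 3 then
    if PySem.List.slice l (some i) (some (i + 4)) = ([1, 2, 3, 1] : List Int) then
      solutionLoop (PySem.List.slice l none (some i) ++ PySem.List.slice l (some (i + 4)) none)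
        (i - 3) (ans + 1)
    else
      solutionLoop l (i + 1) ans
  else
    ans
termination_by (5 * (l.length : Int) - i).toNat
decreasing_by
  · exact pv_dec_del l i (by assumption) (by assumption)
  · exact pv_dec_adv l i (by assumption)

def solution (ingredient : List Int) : Int :=
  solutionLoop ingredient 0 0

-- ===== PORT B =====
-- one step of B's for-loop: push x; stack is kept top-first (reversed), so Python's
-- `stack[-4:] == [1,2,3,1]` is `(x :: st).take 4 = [1,3,2,1]` and `del stack[-4:]` is `.drop 4`
def bstep (p : List Int × Int) (x : Int) : List Int × Int :=
  if (x :: p.1).take 4 = ([1, 3, 2, 1] : List Int) then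
    ((x :: p.1).drop 4, p.2 + 1)
  else
    (x :: p.1, p.2)

def solution_alt (ingredient : List Int) : Int :=
  (ingredient.foldl bstep ([], 0)).2

-- ===== PRECONDITION & SPEC =====
def Spec_solution (ingredient : List Int) (out : Int) : Prop := out = solution_alt ingredient
instance (ingredient : List Int) (out : Int) : Decidable (Spec_solution ingredient out) := by unfold Spec_solution; infer_instance

-- ===== CLAIM (what is proved, stated in full; the proofs are below) =====
def Claim_equal_solution : Prop := ∀ (ingredient : List Int), Dom_solution ingredient → Spec_solution ingredient (solution ingredient)

-- ===== LEMMAS AND PROOFS =====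

-- A's loop invariant: no occurrence of [1,2,3,1] strictly left of index i
def NoWin (l : List Int) (i : Int) : Prop :=
  ∀ j : Nat, j + 4 ≤ l.length → (j : Int) < i → (l.drop j).take 4 ≠ ([1, 2, 3, 1] : List Int)

-- the counter threads additively through B's fold
lemma bstep_shift (st : List Int) (c : Int) (x : Int) :
    bstep (st, c) x = ((bstep (st, 0) x).1, c + (bstep (st, 0) x).2) := by
  unfold bstep; split_ifs <;> simp

lemma foldl_shift (rest : List Int) : ∀ (st : List Int) (c : Int),
    rest.foldl bstep (st, c) = ((rest.foldl bstep (st, 0)).1, c + (rest.foldl bstep (st, 0)).2) := by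
  induction rest with
  | nil => intro st c; simp
  | cons x r ih =>
      intro st c
      simp only [List.foldl_cons]
      rw [bstep_shift, ih ((bstep (st, 0) x).1) (c + (bstep (st, 0) x).2),
          ih ((bstep (st, 0) x).1) ((bstep (st, 0) x).2)]
      simp [add_assoc]

-- gluing a processed chunk onto the reversed stack
lemma rev_concat (l : List Int) (k n : Nat) :
    ((l.drop k).take n).reverse ++ (l.take k).reverse = (l.take (k + n)).reverse := by
  rw [← List.reverse_append, ← List.take_add]

-- B's pop condition on stack (l.take m).reverse is exactly "window of l at m-4 is [1,2,3,1]"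
lemma trig (l : List Int) (m : Nat) (hm : m ≤ l.length) :
    ((l.take m).reverse.take 4 = ([1, 3, 2, 1] : List Int)) ↔
      (4 ≤ m ∧ (l.drop (m - 4)).take 4 = ([1, 2, 3, 1] : List Int)) := by
  rcases Nat.lt_or_ge m 4 with h4 | h4
  · constructor
    · intro h
      have := congrArg List.length h
      simp at this
      omega
    · rintro ⟨h, _⟩; omega
  · rw [List.take_reverse]
    have hlen : (l.take m).length = m := by simp [hm]
    rw [hlen, List.drop_take, show m - (m - 4) = 4 by omega, List.reverse_eq_iff]
    have : (([1, 3, 2, 1] : List Int)).reverse = ([1, 2, 3, 1] : List Int) := by decide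
    rw [this]
    simp [h4]

-- windows entirely left of i + 3 never fire the pop condition while pushing a chunk
lemma nowin_chunk (l : List Int) (i : Int) (hw : NoWin l i) (d c : Nat)
    (hlt : (d : Int) + c ≤ i + 3) :
    ∀ n, n < ((l.drop d).take c).length →
      ((((l.drop d).take c).take (n + 1)).reverse ++ (l.take d).reverse).take 4
        ≠ ([1, 3, 2, 1] : List Int) := by
  intro n hn heq
  have hn' : n + 1 ≤ c ∧ d + (n + 1) ≤ l.length := by
    simp [List.length_take] at hn; omega
  rw [List.take_take, min_eq_left hn'.1, rev_concat] at heq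
  rw [trig l (d + (n + 1)) hn'.2] at heq
  exact hw (d + (n + 1) - 4) (by omega) (by omega) heq.2

-- a fold segment during which the pop condition never fires just pushes everything
lemma nopop (rest : List Int) : ∀ (st : List Int) (c : Int),
    (∀ n, n < rest.length → ((rest.take (n + 1)).reverse ++ st).take 4 ≠ ([1, 3, 2, 1] : List Int)) →
    rest.foldl bstep (st, c) = (rest.reverse ++ st, c) := by
  induction rest with
  | nil => intro st c _; simp
  | cons x r ih =>
      intro st c h
      have h0 : (x :: st).take 4 ≠ ([1, 3, 2, 1] : List Int) := by
        simpa using h 0 (by simp)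
      simp only [List.foldl_cons, bstep, if_neg h0]
      rw [ih (x :: st) c]
      · simp
      · intro n hn
        have := h (n + 1) (by simp; omega)
        simpa [List.take_succ_cons] using this
  
-- main lemma: A's loop from state (l, i, ans) returns ans plus what B's fold
-- adds when run over the unprocessed suffix from the stack of the processed prefix
lemma loop_eq (l : List Int) (i ans : Int) :
    -3 ≤ i → NoWin l i →
    solutionLoop l i ans =
      ans + ((l.drop i.toNat).foldl bstep ((l.take i.toNat).reverse, 0)).2 := by
  induction l, i, ans using solutionLoop.induct with
  | case1 l i ans hcond hm ih =>
    -- match branch: delete the window, back up 3, count 1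
    intro h3 hw
    rw [solutionLoop, if_pos hcond, if_pos hm]
    have hlen := congrArg List.length hm
    have hi : 0 ≤ i := by
      by_contra hneg
      simp [PySem.List.slice, PySem.List.clampIdx] at hlen
      split_ifs at hlen <;> omega
    have hk4 : i.toNat + 4 ≤ l.length := by
      simp [PySem.List.slice, PySem.List.clampIdx] at hlen
      split_ifs at hlen <;> omega
    set k := i.toNat with hk
    have hwin : (l.drop k).take 4 = ([1, 2, 3, 1] : List Int) := by
      rw [PySem.List.slice_toNat l hi (by omega), show (i + 4).toNat - i.toNat = 4 by omega] at hm
      exact hm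
    have hl' : PySem.List.slice l none (some i) ++ PySem.List.slice l (some (i + 4)) none
        = l.take k ++ l.drop (k + 4) := by
      rw [PySem.List.slice_to l hi, PySem.List.slice_from l (by omega),
        show (i + 4).toNat = k + 4 by omega]
    rw [hl'] at ih ⊢
    set d := k - 3 with hd
    have hwl' : NoWin (l.take k ++ l.drop (k + 4)) (i - 3) := by
      intro j hj hji
      have hjk : j + 4 ≤ k := by omega
      rw [List.drop_append_of_le_length (by simp; omega),
        List.take_append_of_le_length (by simp [List.length_take]; omega),
        List.drop_take, List.take_take, min_eq_left (by omega)]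
      exact hw j (by omega) (by omega)
    rw [ih (by omega) hwl', show (i - 3).toNat = d by omega]
    -- RHS of the IH: take/drop of the spliced list in terms of l
    have hA : (l.take k ++ l.drop (k + 4)).take d = l.take d := by
      rw [List.take_append_of_le_length (by simp [List.length_take]; omega),
        List.take_take, min_eq_left (by omega)]
    have hB : (l.take k ++ l.drop (k + 4)).drop d = (l.drop d).take (k - d) ++ l.drop (k + 4) := by
      rw [List.drop_append_of_le_length (by simp [List.length_take]; omega), List.drop_take]
    rw [hA, hB, List.foldl_append,
      nopop _ _ _ (nowin_chunk l i hw d (k - d) (by omega)),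
      rev_concat, show d + (k - d) = k by omega]
    -- LHS: process the three pushes, then the pop, then the common tail
    have hsp : l.drop k = (l.drop k).take 3 ++ (l.drop k).drop 3 :=
      (List.take_append_drop 3 _).symm
    have h43 : (l.drop (k + 3)).take 1 = ([1] : List Int) := by
      have := congrArg (List.drop 3) hwin
      simpa [List.drop_take, List.drop_drop] using this
    have hsp2 : l.drop (k + 3) = 1 :: l.drop (k + 4) := by
      have h := (List.take_append_drop 1 (l.drop (k + 3))).symm
      rw [h43, List.drop_drop, show k + 3 + 1 = k + 4 by omega] at h
      simpa using h
    have hpush : (1 : Int) :: (l.take (k + 3)).reverse = (l.take (k + 4)).reverse := by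
      have hta : l.take (k + 4) = l.take (k + 3) ++ (l.drop (k + 3)).take 1 := by
        rw [← List.take_add]
      rw [hta, h43, List.reverse_append]
      simp
    have htrig : ((1 : Int) :: (l.take (k + 3)).reverse).take 4 = ([1, 3, 2, 1] : List Int) := by
      rw [hpush, trig l (k + 4) (by omega)]
      exact ⟨by omega, by simpa [show k + 4 - 4 = k by omega] using hwin⟩
    have hpop : ((1 : Int) :: (l.take (k + 3)).reverse).drop 4 = (l.take k).reverse := by
      rw [hpush, List.drop_reverse, List.length_take, min_eq_left (by omega),
        show k + 4 - 4 = k by omega, List.take_take, min_eq_left (by omega)]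
    conv_rhs => rw [hsp, List.foldl_append,
      nopop _ _ _ (nowin_chunk l i hw k 3 (by omega)), rev_concat,
      List.drop_drop]
    rw [hsp2, List.foldl_cons]
    show _ = ans + (List.foldl bstep (bstep ((l.take (k + 3)).reverse, 0) 1) (l.drop (k + 4))).2
    rw [show bstep ((l.take (k + 3)).reverse, 0) 1
        = ((l.take k).reverse, (0 : Int) + 1) by rw [bstep, if_pos htrig, hpop]]
    conv_rhs => rw [foldl_shift]
    simp
    omega
  | case2 l i ans hcond hne ih =>
    -- advance branch: i := i + 1
    intro h3 hw
    rw [solutionLoop, if_pos hcond, if_neg hne]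
    rcases lt_or_ge i 0 with hi | hi
    · have hw' : NoWin l (i + 1) := by
        intro j hj hji
        exact absurd hji (by omega)
      rw [ih (by omega) hw', show (i + 1).toNat = i.toNat by omega]
    · set k := i.toNat with hk
      have hk4 : k + 4 ≤ l.length := by omega
      have hw' : NoWin l (i + 1) := by
        intro j hj hji
        by_cases hji' : (j : Int) < i
        · exact hw j hj hji'
        · have : j = k := by omega
          subst this
          intro hwin
          apply hne
          rw [PySem.List.slice_toNat l hi (by omega), show (i + 4).toNat - i.toNat = 4 by omega]
          exact hwin
      rw [ih (by omega) hw', show (i + 1).toNat = k + 1 by omega]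
      have hsp : l.drop k = (l.drop k).take 1 ++ (l.drop k).drop 1 :=
        (List.take_append_drop 1 _).symm
      conv_rhs => rw [hsp, List.foldl_append,
        nopop _ _ _ (nowin_chunk l i hw k 1 (by omega)), rev_concat,
        List.drop_drop]
  | case3 l i ans hcond =>
    -- exit: i ≥ len - 3, nothing left of the suffix can ever fire
    intro h3 hw
    rw [solutionLoop, if_neg hcond]
    have hc := nowin_chunk l i hw i.toNat (l.length - i.toNat) (by omega)
    rw [List.take_of_length_le (by simp)] at hc
    rw [nopop _ _ _ hc]
    simp

-- ===== VERDICT (by name: the statement is the Claim_ definition above) =====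
theorem solution_spec : Claim_equal_solution := by
  intro l _
  unfold Spec_solution solution solution_alt
  have := loop_eq l 0 0 (by omega) (by intro j _ hj; omega)
  simpa using this
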